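-- pv_equiv track=rewrite | github.com/thom-heinrich/twinr | src/twinr/automations/store.py | _normalize_weekdays
-- ===== SOURCE A (Python) =====
-- def _normalize_weekdays(values: tuple[int, ...] | list[int] | None) -> tuple[int, ...]:
--     if not values:
--         return ()
--     normalized = tuple(sorted({int(value) for value in values}))
--     for value in normalized:
--         if value < 0 or value > 6:
--             raise ValueError("weekdays must use integers 0-6")
--     return normalized
-- ===== SOURCE B (Python) =====
-- def _normalize_weekdays(values):
--     if not values:
--         return ()
--     mask = 0
--     for value in values:
--         v = int(value)
--         if v < 0 or v > 6:
--             raise ValueError("weekdays must use integers 0-6")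
--         mask |= 1 << v
--     return tuple(i for i in range(7) if (mask >> i) & 1)
-- ===== Notes on version B (the rewrite author's own statement) =====
-- stated objective: alternative
-- what changed: B replaces the set+sort pipeline by a single pass that validates each value and ORs it into a 7-bit bitmask, then emits the set bits in index order; no set object and no sort.
import Mathlib
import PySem

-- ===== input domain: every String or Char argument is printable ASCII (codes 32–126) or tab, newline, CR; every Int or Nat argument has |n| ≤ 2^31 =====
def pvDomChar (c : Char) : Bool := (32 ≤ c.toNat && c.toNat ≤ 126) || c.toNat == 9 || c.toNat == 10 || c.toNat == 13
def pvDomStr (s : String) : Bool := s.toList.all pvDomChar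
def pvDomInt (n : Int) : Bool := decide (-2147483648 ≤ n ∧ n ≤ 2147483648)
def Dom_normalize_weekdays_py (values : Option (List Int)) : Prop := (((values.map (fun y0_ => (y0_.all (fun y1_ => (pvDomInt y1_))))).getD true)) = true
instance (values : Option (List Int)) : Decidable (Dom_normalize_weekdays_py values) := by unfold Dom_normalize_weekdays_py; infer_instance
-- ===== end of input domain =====

-- B replaces A's set+sort pipeline by a single validating pass that ORs each value into a
-- 7-bit bitmask, then emits the set bits in index order (no set object, no sort).
-- Both A and B raise ValueError on out-of-range values; those inputs are excluded by Pre_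
-- (the raise is modeled by returning []).

-- ===== PORT A =====
def normalize_weekdays_py (values : Option (List Int)) : List Int :=
  match values with
  | none => []
  | some vs =>
    if vs = [] then []            -- `if not values: return ()`
    else
      -- normalized = tuple(sorted({int(value) for value in values}))
      let normalized := PySem.List.sorted (PySem.Set.ofList vs) (fun x => x) false
      -- for value in normalized: if value < 0 or value > 6: raise ValueError(...)
      if normalized.any (fun v => decide (v < 0) || decide (6 < v)) then []  -- raise, outside Pre_
      else normalized

-- ===== PORT B =====
-- the `for value in values` loop of Source B: validate, then mask |= 1 << v; none = raise
def pvMaskLoop : List Int → Nat → Option Nat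
  | [], m => some m
  | v :: vs, m =>
    if v < 0 ∨ 6 < v then none                       -- raise ValueError, outside Pre_
    else pvMaskLoop vs (m ||| (1 <<< v.toNat))       -- mask |= 1 << v

def normalize_weekdays_py_alt (values : Option (List Int)) : List Int :=
  match values with
  | none => []
  | some vs =>
    if vs = [] then []            -- `if not values: return ()`
    else
      match pvMaskLoop vs 0 with
      | none => []                -- raise, outside Pre_
      | some m =>
        -- tuple(i for i in range(7) if (mask >> i) & 1)
        (PySem.List.pyRange 0 7 1).filter (fun i => decide ((m >>> i.toNat) &&& 1 ≠ 0))

-- ===== PRECONDITION & SPEC =====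
-- Pre_ excludes exactly the inputs holding a value outside 0..6, on which the Python A raises ValueError.
def Pre_normalize_weekdays_py (values : Option (List Int)) : Prop :=
  ∀ v ∈ values.getD [], 0 ≤ v ∧ v ≤ 6
instance (values : Option (List Int)) : Decidable (Pre_normalize_weekdays_py values) := by
  unfold Pre_normalize_weekdays_py; infer_instance
def pvWitness_normalize_weekdays_py : Option (List Int) := some [3, 1, 1, 0, 6]
def Spec_normalize_weekdays_py (values : Option (List Int)) (out : List Int) : Prop := out = normalize_weekdays_py_alt values
instance (values : Option (List Int)) (out : List Int) : Decidable (Spec_normalize_weekdays_py values out) := by unfold Spec_normalize_weekdays_py; infer_instance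

-- ===== CLAIM (what is proved, stated in full; the proofs are below) =====
def Claim_equal_normalize_weekdays_py : Prop := ∀ (values : Option (List Int)), Dom_normalize_weekdays_py values → Pre_normalize_weekdays_py values → Spec_normalize_weekdays_py values (normalize_weekdays_py values)

-- ===== LEMMAS AND PROOFS =====

-- The mask built by B's loop records exactly membership in vs (all values in 0..6).
theorem pv_maskLoop_bits (vs : List Int) (h : ∀ v ∈ vs, 0 ≤ v ∧ v ≤ 6) (m : Nat) :
    ∃ m', pvMaskLoop vs m = some m' ∧
      ∀ k : Nat, m'.testBit k = (m.testBit k || decide ((k : Int) ∈ vs)) := by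
  induction vs generalizing m with
  | nil => exact ⟨m, rfl, by simp⟩
  | cons v vs ih =>
    have hv := h v (by simp)
    have hrest : ∀ x ∈ vs, 0 ≤ x ∧ x ≤ 6 := fun x hx => h x (by simp [hx])
    obtain ⟨m', hm', hbits⟩ := ih hrest (m ||| (1 <<< v.toNat))
    refine ⟨m', ?_, ?_⟩
    · simp [pvMaskLoop, hm']
      omega
    · intro k
      rw [hbits k]
      have h1 : (1 <<< v.toNat).testBit k = decide (v.toNat = k) := by
        rw [Nat.one_shiftLeft, Nat.testBit_two_pow]
      simp only [Nat.testBit_or, h1, List.mem_cons]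
      have hcast : (v.toNat = k) ↔ (v = (k : Int)) := by omega
      by_cases hk : v = (k : Int) <;> by_cases hk2 : (k : Int) ∈ vs <;>
        · simp [hk, hk2, hcast]; try tauto

-- the bit test B writes is Nat.testBit
theorem pv_bit_test (m n : Nat) : decide ((m >>> n) &&& 1 ≠ 0) = m.testBit n := by
  simp [Nat.testBit, Nat.and_comm]

-- Under Pre_, the strictly increasing list sorted(set(vs)) equals the range(7) membership filter.
theorem pv_sorted_eq_filter (vs : List Int) (h : ∀ v ∈ vs, 0 ≤ v ∧ v ≤ 6) :
    PySem.List.sorted (PySem.Set.ofList vs) (fun x => x) false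
      = (PySem.List.pyRange 0 7 1).filter (fun i => decide (i ∈ vs)) := by
  apply PySem.List.sorted_eq_of_perm_of_pairwise_lt
  · rw [List.perm_ext_iff_of_nodup]
    · intro a
      simp only [List.mem_filter, PySem.List.mem_pyRange_one, PySem.Set.mem_ofList,
        decide_eq_true_eq]
      constructor
      · rintro ⟨_, ha⟩; exact ha
      · intro ha
        have := h a ha
        exact ⟨⟨this.1, by omega⟩, ha⟩
    · exact (PySem.List.nodup_pyRange_one 0 7).filter _
    · exact PySem.Set.nodup_ofList vs
  · exact (PySem.List.pairwise_lt_pyRange_one 0 7).filter _ ..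

-- ===== VERDICT (by name: the statement is the Claim_ definition above) =====
theorem normalize_weekdays_py_spec : Claim_equal_normalize_weekdays_py := by
  intro values _ hpre
  unfold Spec_normalize_weekdays_py normalize_weekdays_py normalize_weekdays_py_alt
  unfold Pre_normalize_weekdays_py at hpre
  cases values with
  | none => rfl
  | some vs =>
    simp only [Option.getD_some] at hpre
    by_cases hnil : vs = []
    · subst hnil; rfl
    · simp only [hnil, if_false]
      obtain ⟨m, hm, hbits⟩ := pv_maskLoop_bits vs hpre 0
      rw [hm]
      have hnoraise :
          (PySem.List.sorted (PySem.Set.ofList vs) (fun x => x) false).any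
            (fun v => decide (v < 0) || decide (6 < v)) = false := by
        simp only [List.any_eq_false]
        intro v hv
        have := hpre v ((PySem.Set.mem_ofList vs v).mp ((PySem.List.mem_sorted ..).mp hv))
        simp only [Bool.or_eq_true, decide_eq_true_eq]
        omega
      rw [hnoraise]
      simp only [Bool.false_eq_true, if_false]
      rw [pv_sorted_eq_filter vs hpre]
      apply List.filter_congr
      intro i hi
      rw [PySem.List.mem_pyRange_one] at hi
      rw [pv_bit_test, hbits i.toNat]
      have : ((i.toNat : Int)) = i := by omega
      simp [this]
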